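-- pv_equiv track=rewrite | github.com/huny77/employment | sample/sample4.py | calc
-- ===== SOURCE A (Python) =====
-- def calc(origin: str, change: str, num: int) -> int:
--     if origin == change:
--         return 0
--     mapper = {
--         # 시계 반시계
--         1: [1, 1],
--         2: [2, 3],
--         3: [4, 5],
--         4: [6, 7]
--     }
--     counter_clock = ord(origin)
--     a, b = 0, 0
--     clock = ord(origin)
--     while True:
--         counter_clock += 1
--         a += 1
--         if counter_clock == 91:
--             counter_clock = 65
--         if counter_clock == ord(change):
--             break
--
--     while True:
--         clock -= 1
--         b += 1
--         if clock == 64: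
--             clock = 90
--         if clock == ord(change):
--             break
--     return min(a*mapper[num][0], b*mapper[num][1])
-- ===== SOURCE B (Python) =====
-- def calc(origin: str, change: str, num: int) -> int:
--     if origin == change:
--         return 0
--     cw, ccw = [(1, 1), (2, 3), (4, 5), (6, 7)][num - 1]
--     a = (ord(change) - ord(origin)) % 26
--     return min(a * cw, (26 - a) * ccw)
-- ===== Notes on version B (the rewrite author's own statement) =====
-- stated objective: simpler
-- what changed: The two wrap-around counting while-loops are replaced by one closed-form modular distance a=(ord(change)-ord(origin))%26, with the clockwise count as 26-a and the weight pair fetched by list index.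
import Mathlib
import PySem

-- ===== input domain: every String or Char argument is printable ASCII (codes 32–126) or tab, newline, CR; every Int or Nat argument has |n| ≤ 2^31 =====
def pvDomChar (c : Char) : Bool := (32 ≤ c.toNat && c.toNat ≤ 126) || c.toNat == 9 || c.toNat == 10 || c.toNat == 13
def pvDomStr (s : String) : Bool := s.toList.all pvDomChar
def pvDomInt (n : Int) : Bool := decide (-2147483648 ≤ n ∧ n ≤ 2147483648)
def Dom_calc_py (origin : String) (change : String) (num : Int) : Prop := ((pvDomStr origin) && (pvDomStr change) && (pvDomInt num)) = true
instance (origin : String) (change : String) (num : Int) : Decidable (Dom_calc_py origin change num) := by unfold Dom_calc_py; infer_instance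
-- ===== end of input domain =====

-- B replaces A's two wrap-around counting while-loops by one closed-form modular distance (objective: simpler).

-- ===== PORT A =====

-- ord(s) for a length-1 string (Pre_ guarantees length 1; 0 is a dummy never used inside Pre_)
def pvOrd (s : String) : Int :=
  match s.toList with
  | [c] => (c.toNat : Int)
  | _ => 0

-- the first while-loop of A: counter_clock += 1; a += 1; wrap 91→65; stop at ord(change).
-- Fuel 26 is enough for every input inside Pre_ (the loop visits each code at most once); on
-- inputs outside Pre_ the Python loop never terminates, and nothing is claimed there.
def pvLoopCCW (target : Int) (cc : Int) (a : Int) : Nat → Int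
  | 0 => a
  | fuel + 1 =>
    let cc' := cc + 1
    let a' := a + 1
    let cc'' := if cc' = 91 then 65 else cc'
    if cc'' = target then a' else pvLoopCCW target cc'' a' fuel

-- the second while-loop of A: clock -= 1; b += 1; wrap 64→90; stop at ord(change).
def pvLoopCW (target : Int) (clock : Int) (b : Int) : Nat → Int
  | 0 => b
  | fuel + 1 =>
    let c' := clock - 1
    let b' := b + 1
    let c'' := if c' = 64 then 90 else c'
    if c'' = target then b' else pvLoopCW target c'' b' fuel

def calc_py (origin : String) (change : String) (num : Int) : Int :=
  if origin = change then 0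
  else
    let mapper : PySem.Dict Int (List Int) :=
      ((((PySem.Dict.empty).insert 1 [1, 1]).insert 2 [2, 3]).insert 3 [4, 5]).insert 4 [6, 7]
    let a := pvLoopCCW (pvOrd change) (pvOrd origin) 0 26
    let b := pvLoopCW (pvOrd change) (pvOrd origin) 0 26
    let row := mapper.getD num []
    min (a * PySem.List.pyGetD row 0 0) (b * PySem.List.pyGetD row 1 0)

-- ===== PORT B =====
def calc_py_alt (origin : String) (change : String) (num : Int) : Int :=
  if origin = change then 0
  else
    let p := PySem.List.pyGetD [((1 : Int), (1 : Int)), (2, 3), (4, 5), (6, 7)] (num - 1) (0, 0)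
    let a := PySem.Int.mod (pvOrd change - pvOrd origin) 26
    min (a * p.1) ((26 - a) * p.2)

-- ===== PRECONDITION & SPEC =====
-- Pre_ excludes exactly the inputs on which the Python A does not return: with origin ≠ change,
-- A raises TypeError unless both strings have length 1, loops forever unless both characters
-- are uppercase A–Z, and raises KeyError unless num ∈ {1,2,3,4}; origin = change always returns 0.
def Pre_calc_py (origin : String) (change : String) (num : Int) : Prop :=
  origin = change ∨
    (origin.toList.length = 1 ∧ change.toList.length = 1 ∧
     origin.toList.all (fun c => 65 ≤ c.toNat && c.toNat ≤ 90) = true ∧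
     change.toList.all (fun c => 65 ≤ c.toNat && c.toNat ≤ 90) = true ∧
     (num = 1 ∨ num = 2 ∨ num = 3 ∨ num = 4))
instance (origin : String) (change : String) (num : Int) : Decidable (Pre_calc_py origin change num) := by
  unfold Pre_calc_py; infer_instance

def pvWitness_calc_py : String × String × Int := ("B", "Z", 3)

def Spec_calc_py (origin : String) (change : String) (num : Int) (out : Int) : Prop := out = calc_py_alt origin change num
instance (origin : String) (change : String) (num : Int) (out : Int) : Decidable (Spec_calc_py origin change num out) := by unfold Spec_calc_py; infer_instance

-- ===== CLAIM (what is proved, stated in full; the proofs are below) =====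
def Claim_equal_calc_py : Prop := ∀ (origin : String) (change : String) (num : Int), Dom_calc_py origin change num → Pre_calc_py origin change num → Spec_calc_py origin change num (calc_py origin change num)

-- ===== LEMMAS AND PROOFS =====

-- the CCW loop of A equals the closed-form forward modular distance, on the 26 × 26 grid of codes
theorem pvLoopCCW_eq : ∀ o : Nat, o < 26 → ∀ t : Nat, t < 26 → o ≠ t →
    pvLoopCCW (65 + (t : Int)) (65 + (o : Int)) 0 26 = PySem.Int.mod ((t : Int) - (o : Int)) 26 := by
  decide

-- the CW loop of A equals 26 minus that distance
theorem pvLoopCW_eq : ∀ o : Nat, o < 26 → ∀ t : Nat, t < 26 → o ≠ t →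
    pvLoopCW (65 + (t : Int)) (65 + (o : Int)) 0 26 = 26 - PySem.Int.mod ((t : Int) - (o : Int)) 26 := by
  decide

theorem calc_py_spec_aux (origin change : String) (num : Int)
    (hpre : Pre_calc_py origin change num) :
    calc_py origin change num = calc_py_alt origin change num := by
  by_cases heq : origin = change
  · simp [calc_py, calc_py_alt, heq]
  · rcases hpre with h | ⟨ho1, hc1, hoU, hcU, hnum⟩
    · exact absurd h heq
    obtain ⟨c, hc⟩ : ∃ c, origin.toList = [c] := List.length_eq_one_iff.mp ho1
    obtain ⟨d, hd⟩ : ∃ d, change.toList = [d] := List.length_eq_one_iff.mp hc1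
    have hcB : 65 ≤ c.toNat ∧ c.toNat ≤ 90 := by
      simpa using List.all_eq_true.mp hoU c (by simp [hc])
    have hdB : 65 ≤ d.toNat ∧ d.toNat ≤ 90 := by
      simpa using List.all_eq_true.mp hcU d (by simp [hd])
    have hne : c.toNat ≠ d.toNat := by
      intro h
      apply heq
      have hcd : c = d := by apply Char.ext; exact UInt32.toNat_inj.mp h
      apply String.toList_inj.mp
      rw [hc, hd, hcd]
    have hordo : pvOrd origin = (c.toNat : Int) := by simp [pvOrd, hc]
    have hordc : pvOrd change = (d.toNat : Int) := by simp [pvOrd, hd]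
    set o : Nat := c.toNat - 65 with ho
    set t : Nat := d.toNat - 65 with ht
    have hoeq : (c.toNat : Int) = 65 + (o : Int) := by omega
    have hteq : (d.toNat : Int) = 65 + (t : Int) := by omega
    have hol : o < 26 := by omega
    have htl : t < 26 := by omega
    have hot : o ≠ t := by omega
    have hmodsym : PySem.Int.mod ((t : Int) - (o : Int)) 26
        = PySem.Int.mod ((65 + (t : Int)) - (65 + (o : Int))) 26 := by ring_nf
    have ha := pvLoopCCW_eq o hol t htl hot
    have hb := pvLoopCW_eq o hol t htl hot
    rcases hnum with h | h | h | h <;>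
      simp only [calc_py, calc_py_alt, if_neg heq, hordo, hordc, hoeq, hteq, ha, hb,
        ← hmodsym, h] <;> norm_num [PySem.Dict.getD, PySem.Dict.get?,
        PySem.Dict.insert, PySem.Dict.empty, PySem.List.pyGetD, show ((2:Int).toNat) = 2 from rfl, show ((3:Int).toNat) = 3 from rfl, show ((1:Int).toNat) = 1 from rfl, show ((0:Int).toNat) = 0 from rfl]

-- ===== VERDICT (by name: the statement is the Claim_ definition above) =====
theorem calc_py_spec : Claim_equal_calc_py := by
  intro origin change num _ hpre
  exact calc_py_spec_aux origin change num hpre
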